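-- pv_equiv track=rewrite | github.com/In-Sam/Chain-of-Privacy-Leakage-via-Prompt-Injection | indirect_jailbreak/utilities.py | extractNonAppearedCharactersList
-- ===== SOURCE A (Python) =====
-- def extractNonAppearedCharactersList(string: str):
--     # 'a' = 0x61 = 97, 'z' = 0x7A = 122
--     obj = {}
--     for i in range(0x61, 0x7B):
--         obj[chr(i)] = True
--
--     for ch in string:
--         obj[ch] = False
--
--     char_list = []
--     for i in range(0x61, 0x7B):
--         if obj[chr(i)] == True:
--             char_list.append(chr(i))
--     return char_list
-- ===== SOURCE B (Python) =====
-- def extractNonAppearedCharactersList(string: str):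
--     # sort the input's characters once, then one merge-style two-pointer walk
--     # along the alphabet against the sorted characters
--     rest = sorted(string)
--     out = []
--     j = 0
--     for c in "abcdefghijklmnopqrstuvwxyz":
--         while j < len(rest) and rest[j] < c:
--             j += 1
--         if j == len(rest) or rest[j] != c:
--             out.append(c)
--     return out
-- ===== Notes on version B (the rewrite author's own statement) =====
-- stated objective: alternative
-- what changed: A's boolean-flag dict with three marking/filter loops is replaced by a sort of the input's characters followed by a single two-pointer merge walk along the alphabet against the sorted suffix, appending each letter the merge never meets.
import Mathlib
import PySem

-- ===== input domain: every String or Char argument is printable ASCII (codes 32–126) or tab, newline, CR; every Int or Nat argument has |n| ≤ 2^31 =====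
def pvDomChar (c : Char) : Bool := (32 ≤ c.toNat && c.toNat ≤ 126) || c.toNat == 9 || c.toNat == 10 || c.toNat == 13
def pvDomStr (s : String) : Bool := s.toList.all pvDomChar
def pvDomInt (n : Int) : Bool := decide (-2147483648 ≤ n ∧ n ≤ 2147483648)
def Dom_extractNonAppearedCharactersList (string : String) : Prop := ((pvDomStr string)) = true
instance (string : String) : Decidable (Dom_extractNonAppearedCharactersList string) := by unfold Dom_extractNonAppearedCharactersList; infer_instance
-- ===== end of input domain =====

-- B replaces A's boolean-flag dict and three marking/filter loops by sorting the input's characters once and doing a single two-pointer merge walk along the alphabet; objective: alternative.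


-- ===== PORT A =====
def extractNonAppearedCharactersList (string : String) : List String :=
  let obj0 : PySem.Dict Char Bool :=
    (PySem.List.pyRange 0x61 0x7B 1).foldl
      (fun d i => d.insert (Char.ofNat i.toNat) true) PySem.Dict.empty
  let obj : PySem.Dict Char Bool :=
    string.toList.foldl (fun d ch => d.insert ch false) obj0
  (PySem.List.pyRange 0x61 0x7B 1).foldl
    (fun char_list i =>
      if obj.getD (Char.ofNat i.toNat) false == true then
        char_list ++ [String.ofList [Char.ofNat i.toNat]]
      else char_list) []

-- ===== PORT B =====
-- the 'while rest and rest[0] < c: rest = rest[1:]' loop of Source B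
def pvSkipLt (c : Char) : List Char → List Char
  | [] => []
  | x :: xs => if x < c then pvSkipLt c xs else x :: xs

def extractNonAppearedCharactersList_alt (string : String) : List String :=
  let rest0 := PySem.List.sorted string.toList (fun c => c) false
  (("abcdefghijklmnopqrstuvwxyz".toList).foldl
    (fun (st : List Char × List String) c =>
      let rest := pvSkipLt c st.1
      match rest with
      | [] => (rest, st.2 ++ [String.ofList [c]])
      | x :: _ => if x ≠ c then (rest, st.2 ++ [String.ofList [c]]) else (rest, st.2))
    (rest0, [])).2

-- ===== PRECONDITION & SPEC =====
def Spec_extractNonAppearedCharactersList (string : String) (out : List String) : Prop := out = extractNonAppearedCharactersList_alt string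
instance (string : String) (out : List String) : Decidable (Spec_extractNonAppearedCharactersList string out) := by unfold Spec_extractNonAppearedCharactersList; infer_instance

-- ===== CLAIM (what is proved, stated in full; the proofs are below) =====
def Claim_equal_extractNonAppearedCharactersList : Prop := ∀ (string : String), Dom_extractNonAppearedCharactersList string → Spec_extractNonAppearedCharactersList string (extractNonAppearedCharactersList string)

-- ===== LEMMAS AND PROOFS =====

-- phase 2 of A: marking every seen character false
theorem getD_foldl_insert_false {d : PySem.Dict Char Bool} {l : List Char} {c : Char} {dflt : Bool} :
    (l.foldl (fun d ch => d.insert ch false) d).getD c dflt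
      = if c ∈ l then false else d.getD c dflt := by
  induction l generalizing d with
  | nil => simp
  | cons x xs ih =>
      simp only [List.foldl_cons, ih, PySem.Dict.getD_insert, List.mem_cons]
      by_cases hx : c = x <;> by_cases hm : c ∈ xs <;> simp [hx, hm]

-- phase 1 of A: initialising every chr(i) to true
theorem getD_foldl_insert_true {d : PySem.Dict Char Bool} {l : List Int} {c : Char} {dflt : Bool} :
    (l.foldl (fun d i => d.insert (Char.ofNat i.toNat) true) d).getD c dflt
      = if c ∈ l.map (fun i => Char.ofNat i.toNat) then true else d.getD c dflt := by
  induction l generalizing d with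
  | nil => simp
  | cons x xs ih =>
      simp only [List.foldl_cons, ih, PySem.Dict.getD_insert, List.map_cons, List.mem_cons]
      by_cases hx : c = Char.ofNat x.toNat <;> by_cases hm : c ∈ xs.map (fun i => Char.ofNat i.toNat) <;>
        simp [hx, hm]

theorem az_eq_map_pyRange :
    "abcdefghijklmnopqrstuvwxyz".toList
      = (PySem.List.pyRange 0x61 0x7B 1).map (fun i => Char.ofNat i.toNat) := by decide

-- A computes the alphabet filtered by non-membership in the string
theorem extractNonAppearedCharactersList_eq_filter (s : String) :
    extractNonAppearedCharactersList s
      = (("abcdefghijklmnopqrstuvwxyz".toList).filter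
          (fun c => !s.toList.contains c)).map (fun c => String.ofList [c]) := by
  unfold extractNonAppearedCharactersList
  dsimp only []
  rw [PySem.List.foldl_append_if]
  rw [az_eq_map_pyRange, List.filter_map, List.map_map, List.nil_append]
  apply congrArg
  apply List.filter_congr
  intro i hi
  have hmem : Char.ofNat i.toNat ∈ (PySem.List.pyRange 0x61 0x7B 1).map (fun i => Char.ofNat i.toNat) :=
    List.mem_map_of_mem hi
  rw [getD_foldl_insert_false, getD_foldl_insert_true, if_pos hmem]
  by_cases h : Char.ofNat i.toNat ∈ s.toList <;> simp [h, Function.comp]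

-- skipping below b then below c (b ≤ c) is skipping below c
theorem pvSkipLt_skip {b c : Char} (hbc : b ≤ c) (l : List Char) :
    pvSkipLt c (pvSkipLt b l) = pvSkipLt c l := by
  induction l with
  | nil => rfl
  | cons x xs ih =>
      by_cases hx : x < b
      · have hxc : x < c := lt_of_lt_of_le hx hbc
        simp [pvSkipLt, hx, hxc, ih]
      · simp [pvSkipLt, hx]

-- on a sorted list, the head after skipping characterises membership
theorem pvSkipLt_head_mem {l : List Char} (hl : l.Pairwise (· ≤ ·)) (c : Char) :
    (pvSkipLt c l).head? = some c ↔ c ∈ l := by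
  induction l with
  | nil => simp [pvSkipLt]
  | cons x xs ih =>
      have hx_le : ∀ y ∈ xs, x ≤ y := (List.pairwise_cons.mp hl).1
      have hxs : xs.Pairwise (· ≤ ·) := (List.pairwise_cons.mp hl).2
      by_cases hx : x < c
      · have hne : c ≠ x := fun h => absurd (h ▸ hx) (lt_irrefl c)
        simp [pvSkipLt, hx, ih hxs, hne]
      · simp only [pvSkipLt, if_neg hx, List.head?_cons, Option.some.injEq, List.mem_cons]
        constructor
        · intro h; exact Or.inl h.symm
        · rintro (h | h)
          · exact h.symm
          · have h1 : x ≤ c := hx_le c h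
            have h2 : c ≤ x := le_of_not_gt hx
            exact le_antisymm h1 h2

-- B's merge walk, as an invariant over the remaining alphabet
theorem pvFold_inv (l : List Char) (hl : l.Pairwise (· ≤ ·)) :
    ∀ (alpha : List Char), alpha.Pairwise (· ≤ ·) →
    ∀ (r : List Char), (∀ c ∈ alpha, pvSkipLt c r = pvSkipLt c l) →
    ∀ (acc : List String),
    (alpha.foldl
      (fun (st : List Char × List String) c =>
        let rest := pvSkipLt c st.1
        match rest with
        | [] => (rest, st.2 ++ [String.ofList [c]])
        | x :: _ => if x ≠ c then (rest, st.2 ++ [String.ofList [c]]) else (rest, st.2))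
      (r, acc)).2
      = acc ++ (alpha.filter (fun c => !l.contains c)).map (fun c => String.ofList [c]) := by
  intro alpha
  induction alpha with
  | nil => intro _ r _ acc; simp
  | cons c cs ih =>
      intro halpha r hr acc
      have hc_le : ∀ y ∈ cs, c ≤ y := (List.pairwise_cons.mp halpha).1
      have hcs : cs.Pairwise (· ≤ ·) := (List.pairwise_cons.mp halpha).2
      have hrest : pvSkipLt c r = pvSkipLt c l := hr c (List.mem_cons_self ..)
      have hr' : ∀ c' ∈ cs, pvSkipLt c' (pvSkipLt c l) = pvSkipLt c' l := by
        intro c' hc'; exact pvSkipLt_skip (hc_le c' hc') l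
      have hmem := pvSkipLt_head_mem hl c
      simp only [List.foldl_cons, List.filter_cons]
      by_cases hin : c ∈ l
      · have hhead : (pvSkipLt c l).head? = some c := hmem.mpr hin
        obtain ⟨t, ht⟩ : ∃ t, pvSkipLt c l = c :: t := by
          cases h : pvSkipLt c l with
          | nil => rw [h] at hhead; simp at hhead
          | cons y t => rw [h] at hhead; simp at hhead; exact ⟨t, by rw [hhead]⟩
        simp only [hrest, ht]
        rw [if_neg (by simp)]
        have := ih hcs (c :: t) (fun c' hc' => by rw [← ht]; exact hr' c' hc') acc
        rw [this]
        simp [hin]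
      · have hhead : (pvSkipLt c l).head? ≠ some c := fun h => hin (hmem.mp h)
        have hstep :
            (match pvSkipLt c l with
              | [] => (pvSkipLt c l, acc ++ [String.ofList [c]])
              | x :: _ => if x ≠ c then (pvSkipLt c l, acc ++ [String.ofList [c]])
                          else (pvSkipLt c l, acc)) = (pvSkipLt c l, acc ++ [String.ofList [c]]) := by
          cases h : pvSkipLt c l with
          | nil => simp
          | cons y t =>
              have hyc : y ≠ c := by rw [h] at hhead; simpa using hhead
              simp [hyc]
        simp only [hrest, hstep]
        have := ih hcs (pvSkipLt c l) hr' (acc ++ [String.ofList [c]])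
        rw [this]
        simp [hin]

-- ===== VERDICT (by name: the statement is the Claim_ definition above) =====
theorem extractNonAppearedCharactersList_spec : Claim_equal_extractNonAppearedCharactersList := by
  intro s _
  show _ = extractNonAppearedCharactersList_alt s
  rw [extractNonAppearedCharactersList_eq_filter]
  unfold extractNonAppearedCharactersList_alt
  dsimp only []
  have hl : (PySem.List.sorted s.toList (fun c => c) false).Pairwise (· ≤ ·) :=
    PySem.List.sorted_pairwise s.toList (fun c => c)
  have halpha : ("abcdefghijklmnopqrstuvwxyz".toList).Pairwise (· ≤ ·) := by decide
  rw [pvFold_inv _ hl _ halpha _ (fun _ _ => rfl) []]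
  rw [List.nil_append]
  apply congrArg
  apply List.filter_congr
  intro c _
  have : c ∈ PySem.List.sorted s.toList (fun c => c) false ↔ c ∈ s.toList :=
    PySem.List.mem_sorted ..
  by_cases h : c ∈ s.toList <;> simp [h, this]
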